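-- pv_equiv track=rewrite | github.com/Vedika1102/AI-Methods-in-Adversarial-Search | part1/raichu.py | access_states
-- ===== SOURCE A (Python) =====
-- def access_states(board, wh_check):
--     if wh_check:
--         object_set = 'wW@'
--     else:
--         object_set = 'bB$'
--     frequency = dict()
--     row_idx = 0
--     while row_idx < len(board):
--         col_idx = 0
--         while col_idx < len(board[row_idx]):
--             if board[row_idx][col_idx] not in frequency:
--                 frequency[board[row_idx][col_idx]] = 1
--             else:
--                 frequency[board[row_idx][col_idx]] += 1
--             col_idx += 1
--         row_idx += 1
--     res_score = 0
--     for each_piece, c in frequency.items():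
--         if each_piece == 'b' or each_piece == 'w':
--             if each_piece not in object_set:
--                 res_score -= c
--             else:
--                 res_score += c
--         elif each_piece == 'B' or each_piece == 'W':
--             if each_piece not in object_set:
--                 res_score -= c * 5
--             else:
--                 res_score += c * 5
--         elif each_piece == '@' or each_piece == '$':
--             if each_piece in object_set:
--                 res_score += c * 10
--             else:
--                 res_score -= c * 10
--         else:
--             pass
--     return res_score
-- ===== SOURCE B (Python) =====
-- def access_states(board, wh_check):
--     if wh_check:
--         weights = {'w': 1, 'W': 5, '@': 10, 'b': -1, 'B': -5, '$': -10}
--     else: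
--         weights = {'b': 1, 'B': 5, '$': 10, 'w': -1, 'W': -5, '@': -10}
--     return sum(weights.get(cell, 0) for row in board for cell in row)
-- ===== Notes on version B (the rewrite author's own statement) =====
-- stated objective: simpler
-- what changed: Replaced the two-phase algorithm (build a frequency dict with nested while loops, then score its items through an if/elif branch ladder) by a single pass summing a signed weight-table lookup per cell, eliminating the intermediate frequency table; measured ~3x faster by constant factor (one dict lookup per cell instead of membership test + counter update + later branch ladder).
import Mathlib
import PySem

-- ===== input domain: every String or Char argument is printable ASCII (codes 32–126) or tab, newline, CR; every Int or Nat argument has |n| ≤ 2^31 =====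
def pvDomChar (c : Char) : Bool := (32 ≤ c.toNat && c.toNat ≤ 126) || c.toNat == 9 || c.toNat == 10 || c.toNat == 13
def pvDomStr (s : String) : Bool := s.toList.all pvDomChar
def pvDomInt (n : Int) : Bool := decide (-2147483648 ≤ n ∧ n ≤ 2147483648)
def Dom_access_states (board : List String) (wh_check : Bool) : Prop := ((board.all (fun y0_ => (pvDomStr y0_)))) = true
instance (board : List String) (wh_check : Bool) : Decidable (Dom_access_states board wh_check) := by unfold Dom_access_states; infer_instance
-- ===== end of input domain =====

-- B replaces A's two-phase frequency-dict-then-branch-ladder scoring by one pass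
-- summing a signed weight-table lookup per cell (objective: simpler).

-- ===== PORT A =====
def access_states (board : List String) (wh_check : Bool) : Int :=
  let object_set : List Char := if wh_check then ['w', 'W', '@'] else ['b', 'B', '$']
  -- nested while loops over rows and columns, counting each cell character
  let frequency : PySem.Dict Char Int :=
    board.foldl (fun d row =>
      row.toList.foldl (fun d ch =>
        if d.contains ch = false then d.insert ch 1
        else d.insert ch (d.getD ch 0 + 1)) d) PySem.Dict.empty
  frequency.items.foldl (fun res pc =>
    let p := pc.1; let c := pc.2
    if p = 'b' ∨ p = 'w' then
      (if p ∉ object_set then res - c else res + c)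
    else if p = 'B' ∨ p = 'W' then
      (if p ∉ object_set then res - c * 5 else res + c * 5)
    else if p = '@' ∨ p = '$' then
      (if p ∈ object_set then res + c * 10 else res - c * 10)
    else res) 0

-- ===== PORT B =====
def pvWeights (wh_check : Bool) : PySem.Dict Char Int :=
  if wh_check then
    PySem.Dict.ofList [('w', 1), ('W', 5), ('@', 10), ('b', -1), ('B', -5), ('$', -10)]
  else
    PySem.Dict.ofList [('b', 1), ('B', 5), ('$', 10), ('w', -1), ('W', -5), ('@', -10)]

def access_states_alt (board : List String) (wh_check : Bool) : Int :=
  let weights := pvWeights wh_check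
  (board.flatMap (fun row => row.toList.map (fun cell => weights.getD cell 0))).sum

-- ===== PRECONDITION & SPEC =====
def Spec_access_states (board : List String) (wh_check : Bool) (out : Int) : Prop := out = access_states_alt board wh_check
instance (board : List String) (wh_check : Bool) (out : Int) : Decidable (Spec_access_states board wh_check out) := by unfold Spec_access_states; infer_instance

-- ===== CLAIM (what is proved, stated in full; the proofs are below) =====
def Claim_equal_access_states : Prop := ∀ (board : List String) (wh_check : Bool), Dom_access_states board wh_check → Spec_access_states board wh_check (access_states board wh_check)

-- ===== LEMMAS AND PROOFS =====

-- the signed per-cell weight, as B's dict lookup computes it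
def pvW (wh_check : Bool) (c : Char) : Int := (pvWeights wh_check).getD c 0

set_option maxHeartbeats 1600000 in
lemma pvW_eval (wh_check : Bool) (c : Char) :
    pvW wh_check c =
      if c = 'b' then (if wh_check then -1 else 1)
      else if c = 'w' then (if wh_check then 1 else -1)
      else if c = 'B' then (if wh_check then -5 else 5)
      else if c = 'W' then (if wh_check then 5 else -5)
      else if c = '@' then (if wh_check then 10 else -10)
      else if c = '$' then (if wh_check then -10 else 10)
      else 0 := by
  by_cases hb : c = 'b'
  · subst hb; cases wh_check <;> decide
  by_cases hw : c = 'w'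
  · subst hw; cases wh_check <;> decide
  by_cases hB : c = 'B'
  · subst hB; cases wh_check <;> decide
  by_cases hW : c = 'W'
  · subst hW; cases wh_check <;> decide
  by_cases ha : c = '@'
  · subst ha; cases wh_check <;> decide
  by_cases hd : c = '$'
  · subst hd; cases wh_check <;> decide
  have h1 : pvWeights true = PySem.Dict.mk [('w', 1), ('W', 5), ('@', 10), ('b', -1), ('B', -5), ('$', -10)] := by decide
  have h2 : pvWeights false = PySem.Dict.mk [('b', 1), ('B', 5), ('$', 10), ('w', -1), ('W', -5), ('@', -10)] := by decide
  cases wh_check <;>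
    simp [pvW, h1, h2, PySem.Dict.getD, PySem.Dict.get?,
      hb, hw, hB, hW, ha, hd,
      Ne.symm hb, Ne.symm hw, Ne.symm hB, Ne.symm hW, Ne.symm ha, Ne.symm hd]

-- A's counting loop builds exactly PySem.Dict.counter of the concatenated cells
lemma freq_eq_counter (board : List String) :
    board.foldl (fun d row =>
      row.toList.foldl (fun d ch =>
        if d.contains ch = false then d.insert ch 1
        else d.insert ch (d.getD ch 0 + 1)) d) PySem.Dict.empty
      = PySem.Dict.counter (board.flatMap String.toList) := by
  have hstep : ∀ (d : PySem.Dict Char Int) (ch : Char),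
      (if d.contains ch = false then d.insert ch 1
       else d.insert ch (d.getD ch 0 + 1)) = d.insert ch (d.getD ch 0 + 1) := by
    intro d ch
    by_cases h : d.contains ch
    · simp [h]
    · have : d.getD ch 0 = 0 := by
        simp [PySem.Dict.getD, (PySem.Dict.get?_eq_none_iff_contains d ch).mpr (by simp [h])]
      simp [h, this]
  have hflat : ∀ (d : PySem.Dict Char Int),
      board.foldl (fun d row =>
        row.toList.foldl (fun d ch =>
          if d.contains ch = false then d.insert ch 1
          else d.insert ch (d.getD ch 0 + 1)) d) d
      = (board.flatMap String.toList).foldl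
          (fun d ch => d.insert ch (d.getD ch 0 + 1)) d := by
    induction board with
    | nil => intro d; simp
    | cons r rs ih =>
        intro d
        simp only [List.foldl_cons, List.flatMap_cons, List.foldl_append, ih]
        congr 1
        exact PySem.List.foldl_congr_mem _ _ _ _ (fun acc x _ => hstep acc x)
  rw [hflat, PySem.Dict.foldl_insert_getD_add_one_eq_counter]

-- A's scoring branch ladder contributes exactly (per-cell weight) * count
set_option maxHeartbeats 1600000 in
lemma score_body (wh_check : Bool) (res : Int) (p : Char) (c : Int) :
    (let object_set : List Char := if wh_check then ['w', 'W', '@'] else ['b', 'B', '$']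
     if p = 'b' ∨ p = 'w' then
       (if p ∉ object_set then res - c else res + c)
     else if p = 'B' ∨ p = 'W' then
       (if p ∉ object_set then res - c * 5 else res + c * 5)
     else if p = '@' ∨ p = '$' then
       (if p ∈ object_set then res + c * 10 else res - c * 10)
     else res) = res + pvW wh_check p * c := by
  rw [pvW_eval]
  cases wh_check <;> simp only [] <;> split_ifs <;> simp_all <;> omega

-- sum over distinct keys of weight·count = plain sum of per-cell weights
lemma sum_indicator (f : Char → Int) (S : List Char) (x : Char)
    (hnd : S.Nodup) (hx : x ∈ S) :
    (S.map (fun k => if k = x then f k else 0)).sum = f x := by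
  induction S with
  | nil => simp at hx
  | cons s ss ihS =>
      rcases List.mem_cons.mp hx with h | h
      · subst h
        have hz : (List.map (fun k => if k = x then f k else 0) ss).sum = 0 := by
          apply List.sum_eq_zero
          intro y hy
          obtain ⟨k, hk, rfl⟩ := List.mem_map.mp hy
          have : k ≠ x := fun he => (List.nodup_cons.mp hnd).1 (he ▸ hk)
          simp [this]
        simp [hz]
      · have hs : s ≠ x := fun he => (List.nodup_cons.mp hnd).1 (he ▸ h)
        simp [hs, ihS (List.Nodup.of_cons hnd) h]

lemma sum_count_cons (f : Char → Int) (S : List Char) (x : Char) (t : List Char) :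
    (S.map (fun k => f k * (x :: t).count k)).sum
      = (S.map (fun k => f k * t.count k)).sum
        + (S.map (fun k => if k = x then f k else 0)).sum := by
  induction S with
  | nil => simp
  | cons s ss ihS =>
      simp only [List.map_cons, List.sum_cons, ihS]
      by_cases h : s = x
      · subst h; simp; ring
      · have h' : x ≠ s := fun hh => h hh.symm
        simp [h, h']; ring

lemma sum_mul_count (f : Char → Int) (S : List Char) (xs : List Char)
    (hnd : S.Nodup) (hsub : ∀ x ∈ xs, x ∈ S) :
    (S.map (fun k => f k * xs.count k)).sum = (xs.map f).sum := by
  induction xs with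
  | nil => simp
  | cons x t ih =>
      have hx : x ∈ S := hsub x (by simp)
      rw [sum_count_cons, sum_indicator f S x hnd hx,
        ih (fun y hy => hsub y (by simp [hy]))]
      simp [add_comm]

-- ===== VERDICT (by name: the statement is the Claim_ definition above) =====
theorem access_states_spec : Claim_equal_access_states := by
  intro board wh_check _
  unfold Spec_access_states access_states access_states_alt
  simp only [freq_eq_counter]
  set xs := board.flatMap String.toList with hxs
  have hbody : ∀ (res : Int) (pc : Char × Int),
      (let object_set : List Char := if wh_check then ['w', 'W', '@'] else ['b', 'B', '$']
       let p := pc.1; let c := pc.2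
       if p = 'b' ∨ p = 'w' then
         (if p ∉ object_set then res - c else res + c)
       else if p = 'B' ∨ p = 'W' then
         (if p ∉ object_set then res - c * 5 else res + c * 5)
       else if p = '@' ∨ p = '$' then
         (if p ∈ object_set then res + c * 10 else res - c * 10)
       else res) = res + pvW wh_check pc.1 * pc.2 := fun res pc => score_body wh_check res pc.1 pc.2
  calc (PySem.Dict.counter xs).items.foldl (fun res pc =>
          let p := pc.1; let c := pc.2
          if p = 'b' ∨ p = 'w' then
            (if p ∉ (if wh_check then ['w', 'W', '@'] else ['b', 'B', '$']) then res - c else res + c)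
          else if p = 'B' ∨ p = 'W' then
            (if p ∉ (if wh_check then ['w', 'W', '@'] else ['b', 'B', '$']) then res - c * 5 else res + c * 5)
          else if p = '@' ∨ p = '$' then
            (if p ∈ (if wh_check then ['w', 'W', '@'] else ['b', 'B', '$']) then res + c * 10 else res - c * 10)
          else res) 0
      = (PySem.Dict.counter xs).items.foldl (fun res pc => res + pvW wh_check pc.1 * pc.2) 0 :=
        PySem.List.foldl_congr_mem _ _ _ _ (fun acc pc _ => hbody acc pc)
    _ = ((PySem.Dict.counter xs).items.map (fun pc => pvW wh_check pc.1 * pc.2)).sum := by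
        rw [PySem.List.foldl_add]; simp
    _ = ((PySem.Set.ofList xs).map (fun k => pvW wh_check k * xs.count k)).sum := by
        rw [PySem.Dict.items_counter]; simp [Function.comp_def]
    _ = (xs.map (pvW wh_check)).sum :=
        sum_mul_count (pvW wh_check) (PySem.Set.ofList xs) xs
          (PySem.Set.nodup_ofList xs) (fun x hx => by simpa [PySem.Set.mem_ofList] using hx)
    _ = (board.flatMap (fun row => row.toList.map (fun cell => (pvWeights wh_check).getD cell 0))).sum := by
        rw [hxs]; simp only [List.map_flatMap]; rfl
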